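-- pv_equiv track=rewrite | github.com/ray-project/ray | ci/ray_ci/automation/determine_microcheck_tests.py | _get_most_impact_test
-- ===== SOURCE A (Python) =====
-- from typing import Dict, List, Set
--
-- def _get_most_impact_test(
--     test_to_commits: Dict[str, Set[str]],
--     flaky_tests: Set[str],
--     already_covered_commits: Set[str],
-- ) -> str:
--     """
--     Get the test that covers the most PR revisions, excluding the revisions that have
--     already been covered
--     """
--     impact_none_flaky_test = None
--     impact_none_flaky_coverage = 0
--     impact_flaky_test = None
--     impact_flaky_coverage = 0
--
--     for test, prs in test_to_commits.items():
--         new_coverage = len(prs - already_covered_commits)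
--
--         if new_coverage == 0:
--             # Skip tests that cover no new PRs
--             continue
--
--         # find more impact non-flaky test
--         if test not in flaky_tests:
--             if (
--                 impact_none_flaky_test is None
--                 or new_coverage > impact_none_flaky_coverage
--             ):
--                 impact_none_flaky_test = test
--                 impact_none_flaky_coverage = new_coverage
--
--         # find more impact flaky test
--         if test in flaky_tests:
--             if impact_flaky_test is None or new_coverage > impact_flaky_coverage:
--                 impact_flaky_test = test
--                 impact_flaky_coverage = new_coverage
--
--     # return flaky test only there are no more non-flaky test that can increase the
--     # coverage
--     return impact_none_flaky_test or impact_flaky_test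
-- ===== SOURCE B (Python) =====
-- def _get_most_impact_test(test_to_commits, flaky_tests, already_covered_commits):
--     coverage = {
--         test: len(prs - already_covered_commits)
--         for test, prs in test_to_commits.items()
--     }
--     candidates = [test for test in coverage if coverage[test] > 0]
--     non_flaky = [test for test in candidates if test not in flaky_tests]
--     flaky = [test for test in candidates if test in flaky_tests]
--     best_non_flaky = max(non_flaky, key=coverage.__getitem__, default=None)
--     best_flaky = max(flaky, key=coverage.__getitem__, default=None)
--     return best_non_flaky or best_flaky
-- ===== Notes on version B (the rewrite author's own statement) =====
-- stated objective: idiomatic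
-- what changed: Replaces the single loop carrying four accumulator variables (best test and coverage for the non-flaky and flaky groups) by a coverage dict comprehension, candidate filtering, a non-flaky/flaky split, and max(..., key=coverage.__getitem__, default=None) for each group.
import Mathlib
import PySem

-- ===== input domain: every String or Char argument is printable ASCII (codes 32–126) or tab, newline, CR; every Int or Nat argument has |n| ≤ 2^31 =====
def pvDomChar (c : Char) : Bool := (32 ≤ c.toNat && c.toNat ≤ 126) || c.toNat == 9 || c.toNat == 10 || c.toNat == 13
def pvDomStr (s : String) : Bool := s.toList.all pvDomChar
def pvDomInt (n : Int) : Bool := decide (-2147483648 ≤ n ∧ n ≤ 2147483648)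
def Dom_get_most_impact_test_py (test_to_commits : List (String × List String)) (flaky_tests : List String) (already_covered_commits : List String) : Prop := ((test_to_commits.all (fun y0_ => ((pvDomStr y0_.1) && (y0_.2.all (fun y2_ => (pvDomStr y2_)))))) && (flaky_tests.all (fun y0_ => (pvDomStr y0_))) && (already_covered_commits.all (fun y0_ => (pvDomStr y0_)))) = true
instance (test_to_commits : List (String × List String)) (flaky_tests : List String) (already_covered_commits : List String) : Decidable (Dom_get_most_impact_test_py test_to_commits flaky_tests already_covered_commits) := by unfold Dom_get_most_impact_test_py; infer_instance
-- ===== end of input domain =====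

-- B replaces A's four-accumulator loop by a coverage dict, candidate filtering and per-group max(key=coverage) (idiomatic decomposition, same cost).


-- ===== PORT A =====
-- shared by both ports: len(prs - already_covered_commits) (both Pythons contain this exact expression)
def pvNewCov (already_covered_commits prs : List String) : Int :=
  PySem.Set.len (PySem.Set.diff (PySem.Set.ofList prs) already_covered_commits)

-- shared by both ports: Python's `x or y` on Optional[str] (None and "" are falsy)
def pvPyOr (a b : Option String) : Option String :=
  match a with
  | some s => if s = "" then b else some s
  | none => b

-- the body of A's `for test, prs in test_to_commits.items()` loop; state =
-- (impact_none_flaky_test, impact_none_flaky_coverage, impact_flaky_test, impact_flaky_coverage)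
def pvAStep (flaky_tests already_covered_commits : List String)
    (st : Option String × Int × Option String × Int) (p : String × List String) :
    Option String × Int × Option String × Int :=
  let new_coverage := pvNewCov already_covered_commits p.2
  if new_coverage = 0 then st
  else
    let st1 :=
      if ¬ (flaky_tests.contains p.1) then
        (if st.1 = none ∨ new_coverage > st.2.1 then (some p.1, new_coverage, st.2.2) else st)
      else st
    if flaky_tests.contains p.1 then
      (if st1.2.2.1 = none ∨ new_coverage > st1.2.2.2 then (st1.1, st1.2.1, some p.1, new_coverage) else st1)
    else st1

def get_most_impact_test_py (test_to_commits : List (String × List String)) (flaky_tests : List String) (already_covered_commits : List String) : Option String :=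
  let st := test_to_commits.foldl (pvAStep flaky_tests already_covered_commits) (none, 0, none, 0)
  pvPyOr st.1 st.2.2.1

-- ===== PORT B =====
def get_most_impact_test_py_alt (test_to_commits : List (String × List String)) (flaky_tests : List String) (already_covered_commits : List String) : Option String :=
  let coverage : PySem.Dict String Int :=
    PySem.Dict.ofList (test_to_commits.map (fun p => (p.1, pvNewCov already_covered_commits p.2)))
  let candidates := coverage.keys.filter (fun t => coverage.getD t 0 > 0)
  let non_flaky := candidates.filter (fun t => ¬ flaky_tests.contains t)
  let flaky := candidates.filter (fun t => flaky_tests.contains t)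
  let best_non_flaky := PySem.List.max? non_flaky (fun t => coverage.getD t 0)
  let best_flaky := PySem.List.max? flaky (fun t => coverage.getD t 0)
  pvPyOr best_non_flaky best_flaky

-- ===== PRECONDITION & SPEC =====
-- Pre_ excludes association lists with duplicate test keys: a Python dict cannot carry them
-- (later entries overwrite earlier ones), so the assoc-list reading of such inputs is accidental.
def Pre_get_most_impact_test_py (test_to_commits : List (String × List String)) (flaky_tests : List String) (already_covered_commits : List String) : Prop :=
  (test_to_commits.map Prod.fst).Nodup
instance (test_to_commits : List (String × List String)) (flaky_tests : List String) (already_covered_commits : List String) : Decidable (Pre_get_most_impact_test_py test_to_commits flaky_tests already_covered_commits) := by unfold Pre_get_most_impact_test_py; infer_instance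

def pvWitness_get_most_impact_test_py : (List (String × List String)) × List String × List String :=
  ([("t1", ["c1"]), ("t2", ["c1", "c2"])], ["t2"], ["c2"])

def Spec_get_most_impact_test_py (test_to_commits : List (String × List String)) (flaky_tests : List String) (already_covered_commits : List String) (out : Option String) : Prop := out = get_most_impact_test_py_alt test_to_commits flaky_tests already_covered_commits
instance (test_to_commits : List (String × List String)) (flaky_tests : List String) (already_covered_commits : List String) (out : Option String) : Decidable (Spec_get_most_impact_test_py test_to_commits flaky_tests already_covered_commits out) := by unfold Spec_get_most_impact_test_py; infer_instance

-- ===== CLAIM (what is proved, stated in full; the proofs are below) =====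
def Claim_equal_get_most_impact_test_py : Prop := ∀ (test_to_commits : List (String × List String)) (flaky_tests : List String) (already_covered_commits : List String), Dom_get_most_impact_test_py test_to_commits flaky_tests already_covered_commits → Pre_get_most_impact_test_py test_to_commits flaky_tests already_covered_commits → Spec_get_most_impact_test_py test_to_commits flaky_tests already_covered_commits (get_most_impact_test_py test_to_commits flaky_tests already_covered_commits)

-- ===== LEMMAS AND PROOFS =====

-- the step function of PySem.List.max? (first maximal element)
def pvMaxStep {α κ : Type} [LT κ] [DecidableLT κ] (key : α → κ) (acc : Option α) (x : α) : Option α :=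
  match acc with
  | none => some x
  | some m => if key m < key x then some x else some m

theorem pvMax?_eq_foldl {α κ : Type} [LT κ] [DecidableLT κ] (xs : List α) (key : α → κ) :
    PySem.List.max? xs key = xs.foldl (pvMaxStep key) none := by
  rfl

theorem pvFoldl_maxStep_map {α β κ : Type} [LT κ] [DecidableLT κ] (xs : List α) (f : α → β)
    (key : β → κ) (acc : Option α) :
    (xs.map f).foldl (pvMaxStep key) (Option.map f acc)
      = Option.map f (xs.foldl (pvMaxStep (fun x => key (f x))) acc) := by
  induction xs generalizing acc with
  | nil => rfl
  | cons x t ih =>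
    simp only [List.map_cons, List.foldl_cons]
    rw [← ih]
    congr 1
    cases acc with
    | none => rfl
    | some m => simp only [pvMaxStep, Option.map_some]; split <;> rfl

theorem pvFoldl_maxStep_congr {α κ : Type} [LT κ] [DecidableLT κ] (xs : List α)
    (k1 k2 : α → κ) (acc : Option α)
    (hm : ∀ x ∈ xs, k1 x = k2 x) (ha : ∀ m, acc = some m → k1 m = k2 m) :
    xs.foldl (pvMaxStep k1) acc = xs.foldl (pvMaxStep k2) acc := by
  induction xs generalizing acc with
  | nil => rfl
  | cons x t ih =>
    simp only [List.foldl_cons]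
    have hx : k1 x = k2 x := hm x (by simp)
    have hstep : pvMaxStep k1 acc x = pvMaxStep k2 acc x := by
      cases acc with
      | none => rfl
      | some m => simp only [pvMaxStep, ha m rfl, hx]
    rw [hstep]
    refine ih _ (fun y hy => hm y (by simp [hy])) ?_
    intro m hm'
    cases acc with
    | none =>
      simp only [pvMaxStep] at hm'
      cases hm'; exact hx
    | some m0 =>
      simp only [pvMaxStep] at hm'
      split at hm' <;> cases hm'
      · exact hx
      · exact ha _ rfl

-- coupling between A's accumulator pairs and a maxStep state
def pvPack (covered : List String) (r : Option (String × List String)) : Option String × Int :=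
  match r with
  | none => (none, 0)
  | some p => (some p.1, pvNewCov covered p.2)

theorem pvNewCov_nonneg (covered prs : List String) : 0 ≤ pvNewCov covered prs := by
  simp [pvNewCov, PySem.Set.len]

-- A's loop over l, started at packed states, computes the packed maxSteps over the two filtered lists
theorem pvA_fold (fl cov : List String) (l : List (String × List String))
    (rnf rfl' : Option (String × List String)) :
    l.foldl (pvAStep fl cov) ((pvPack cov rnf).1, (pvPack cov rnf).2, (pvPack cov rfl').1, (pvPack cov rfl').2)
      = (let rnf2 := (l.filter (fun p => decide (0 < pvNewCov cov p.2) && !(fl.contains p.1))).foldl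
            (pvMaxStep (fun p => pvNewCov cov p.2)) rnf
         let rfl2 := (l.filter (fun p => decide (0 < pvNewCov cov p.2) && (fl.contains p.1))).foldl
            (pvMaxStep (fun p => pvNewCov cov p.2)) rfl'
         ((pvPack cov rnf2).1, (pvPack cov rnf2).2, (pvPack cov rfl2).1, (pvPack cov rfl2).2)) := by
  induction l generalizing rnf rfl' with
  | nil => rfl
  | cons p t ih =>
    simp only [List.foldl_cons, List.filter_cons]
    have hnn := pvNewCov_nonneg cov p.2
    by_cases h0 : pvNewCov cov p.2 = 0
    · have hnp : ¬ (0 < pvNewCov cov p.2) := by omega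
      have hf1 : (decide (0 < pvNewCov cov p.2) && !(fl.contains p.1)) = false := by simp [hnp]
      have hf2 : (decide (0 < pvNewCov cov p.2) && (fl.contains p.1)) = false := by simp [hnp]
      have hstep : pvAStep fl cov ((pvPack cov rnf).1, (pvPack cov rnf).2, (pvPack cov rfl').1, (pvPack cov rfl').2) p
          = ((pvPack cov rnf).1, (pvPack cov rnf).2, (pvPack cov rfl').1, (pvPack cov rfl').2) := by
        simp [pvAStep, h0]
      rw [hstep, hf1, hf2]
      simpa using ih rnf rfl'
    · have hpos : 0 < pvNewCov cov p.2 := by omega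
      by_cases hfl : fl.contains p.1
      · have hmem : p.1 ∈ fl := by simpa using hfl
        have hf1 : (decide (0 < pvNewCov cov p.2) && !(fl.contains p.1)) = false := by simp [hmem]
        have hf2 : (decide (0 < pvNewCov cov p.2) && (fl.contains p.1)) = true := by simp [hpos, hmem]
        have hstep : pvAStep fl cov ((pvPack cov rnf).1, (pvPack cov rnf).2, (pvPack cov rfl').1, (pvPack cov rfl').2) p
            = ((pvPack cov rnf).1, (pvPack cov rnf).2,
               (pvPack cov (pvMaxStep (fun q => pvNewCov cov q.2) rfl' p)).1,
               (pvPack cov (pvMaxStep (fun q => pvNewCov cov q.2) rfl' p)).2) := by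
          cases rfl' with
          | none => simp [pvAStep, pvPack, pvMaxStep, h0, hmem]
          | some m =>
            by_cases hlt : pvNewCov cov m.2 < pvNewCov cov p.2
            · simp [pvAStep, pvPack, pvMaxStep, h0, hmem, hlt]
            · simp [pvAStep, pvPack, pvMaxStep, h0, hmem, hlt]
        rw [hstep, hf1, hf2]
        simpa using ih rnf (pvMaxStep (fun q => pvNewCov cov q.2) rfl' p)
      · have hmem : p.1 ∉ fl := by simpa using hfl
        have hf1 : (decide (0 < pvNewCov cov p.2) && !(fl.contains p.1)) = true := by simp [hpos, hmem]
        have hf2 : (decide (0 < pvNewCov cov p.2) && (fl.contains p.1)) = false := by simp [hmem]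
        have hstep : pvAStep fl cov ((pvPack cov rnf).1, (pvPack cov rnf).2, (pvPack cov rfl').1, (pvPack cov rfl').2) p
            = ((pvPack cov (pvMaxStep (fun q => pvNewCov cov q.2) rnf p)).1,
               (pvPack cov (pvMaxStep (fun q => pvNewCov cov q.2) rnf p)).2,
               (pvPack cov rfl').1, (pvPack cov rfl').2) := by
          cases rnf with
          | none => simp [pvAStep, pvPack, pvMaxStep, h0, hmem]
          | some m =>
            by_cases hlt : pvNewCov cov m.2 < pvNewCov cov p.2
            · simp [pvAStep, pvPack, pvMaxStep, h0, hmem, hlt]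
            · simp [pvAStep, pvPack, pvMaxStep, h0, hmem, hlt]
        rw [hstep, hf1, hf2]
        simpa using ih (pvMaxStep (fun q => pvNewCov cov q.2) rnf p) rfl'

-- the coverage dict on nodup keys: items are exactly the mapped pairs
theorem pvCoverage_items (cov : List String) (l : List (String × List String))
    (h : (l.map Prod.fst).Nodup) :
    (PySem.Dict.ofList (l.map (fun p => (p.1, pvNewCov cov p.2)))).items
      = l.map (fun p => (p.1, pvNewCov cov p.2)) := by
  unfold PySem.Dict.ofList PySem.Dict.update
  rw [show (fun (acc : PySem.Dict String Int) (p : String × Int) => acc.insert p.1 p.2)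
        = (fun (d : PySem.Dict String Int) (a : String × Int) => d.insert a.1 a.2) from rfl]
  rw [PySem.Dict.items_foldl_insert_fresh _ _ _ _ (by simp) (by simpa [Function.comp] using h)]
  simp [PySem.Dict.empty]

theorem pvCoverage_keys (cov : List String) (l : List (String × List String))
    (h : (l.map Prod.fst).Nodup) :
    (PySem.Dict.ofList (l.map (fun p => (p.1, pvNewCov cov p.2)))).keys = l.map Prod.fst := by
  simp [PySem.Dict.keys, pvCoverage_items cov l h, Function.comp]

theorem pvCoverage_getD (cov : List String) (l : List (String × List String))
    (h : (l.map Prod.fst).Nodup) (p : String × List String) (hp : p ∈ l) :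
    (PySem.Dict.ofList (l.map (fun p => (p.1, pvNewCov cov p.2)))).getD p.1 0
      = pvNewCov cov p.2 := by
  apply PySem.Dict.getD_of_mem_items
  · rw [pvCoverage_items cov l h]
    exact List.mem_map_of_mem hp
  · rw [pvCoverage_keys cov l h]; exact h

theorem pvPack_fst (cov : List String) (r : Option (String × List String)) :
    (pvPack cov r).1 = r.map Prod.fst := by
  cases r <;> rfl

-- B's per-group pipeline (dict keys → candidate filter → group filter → max?) equals the
-- packed maxStep fold over the correspondingly filtered pair list
theorem pvB_max (fl cov : List String) (l : List (String × List String))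
    (h : (l.map Prod.fst).Nodup) (r : String → Bool) :
    PySem.List.max?
      ((((PySem.Dict.ofList (l.map (fun p => (p.1, pvNewCov cov p.2)))).keys.filter
          (fun t => (PySem.Dict.ofList (l.map (fun p => (p.1, pvNewCov cov p.2)))).getD t 0 > 0)).filter r))
      (fun t => (PySem.Dict.ofList (l.map (fun p => (p.1, pvNewCov cov p.2)))).getD t 0)
    = Option.map Prod.fst
        ((l.filter (fun p => decide (0 < pvNewCov cov p.2) && r p.1)).foldl
          (pvMaxStep (fun p => pvNewCov cov p.2)) none) := by
  have hg : ∀ p ∈ l,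
      (PySem.Dict.ofList (l.map (fun q => (q.1, pvNewCov cov q.2)))).getD p.1 0
        = pvNewCov cov p.2 := fun p hp => pvCoverage_getD cov l h p hp
  rw [pvCoverage_keys cov l h, List.filter_map, List.filter_map, List.filter_filter]
  have hfil : l.filter (fun a => (r ∘ Prod.fst) a && ((fun t =>
        decide ((PySem.Dict.ofList (l.map (fun p => (p.1, pvNewCov cov p.2)))).getD t 0 > 0)) ∘ Prod.fst) a)
      = l.filter (fun p => decide (0 < pvNewCov cov p.2) && r p.1) := by
    apply List.filter_congr
    intro p hp
    simp [Function.comp, hg p hp, Bool.and_comm]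
  rw [hfil, pvMax?_eq_foldl]
  have hmap := pvFoldl_maxStep_map
      (xs := l.filter (fun p => decide (0 < pvNewCov cov p.2) && r p.1)) (f := Prod.fst)
      (key := fun t => (PySem.Dict.ofList (l.map (fun p => (p.1, pvNewCov cov p.2)))).getD t 0)
      (acc := none)
  simp only [Option.map_none] at hmap
  rw [hmap]
  congr 1
  apply pvFoldl_maxStep_congr
  · intro p hp
    exact hg p (List.mem_of_mem_filter hp)
  · intro m hm; cases hm

-- ===== VERDICT (by name: the statement is the Claim_ definition above) =====
theorem get_most_impact_test_py_spec : Claim_equal_get_most_impact_test_py := by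
  unfold Claim_equal_get_most_impact_test_py
  intro l fl cov _ hpre
  unfold Spec_get_most_impact_test_py get_most_impact_test_py get_most_impact_test_py_alt
  simp only []
  have hA := pvA_fold fl cov l none none
  rw [show ((none : Option String), (0 : Int), (none : Option String), (0 : Int))
        = ((pvPack cov none).1, (pvPack cov none).2, (pvPack cov none).1, (pvPack cov none).2) from rfl, hA]
  simp only [pvPack_fst]
  have h1 := pvB_max fl cov l hpre (fun t => decide ¬(fl.contains t = true))
  have h2 := pvB_max fl cov l hpre (fun t => fl.contains t)
  have e1 : l.filter (fun p => decide (0 < pvNewCov cov p.2) && decide ¬(fl.contains p.1 = true))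
      = l.filter (fun p => decide (0 < pvNewCov cov p.2) && !(fl.contains p.1)) := by
    apply List.filter_congr; intro p hp; simp
  rw [e1] at h1
  rw [h1, h2]
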